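-- pv_equiv track=rewrite | github.com/mprashanth27/tip-102-codepath | unit_10/session_2/adv_problem_set_v2/p1_bacon_number.py | bacon_number
-- ===== SOURCE A (Python) =====
-- from collections import deque
--
-- def bacon_number(bacon_network, celeb):
--     # can save checking the entire graph
--     if celeb not in bacon_network:
--         return -1
--     # can save like 2 checks
--     if celeb == "Kevin Bacon":
--         return 0
--
--     visited = set()
--     celeb_queue = deque([("Kevin Bacon", 0)])
--     while celeb_queue:
--         # get current celeb + bacon num
--         current, distance = celeb_queue.popleft()
--         # skip old celebs
--         if current in visited:
--             continue
--         # if target found return bacon number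
--         if current == celeb:
--             return distance
--         # mark celeb visited
--         visited.add(current)
--         # add (neighbors,distance) tuple to queue
--         for person in bacon_network[current]:
--             celeb_queue.append((person, distance + 1))
--     # if no connection return -1
--     return -1
-- ===== SOURCE B (Python) =====
-- def bacon_number(bacon_network, celeb):
--     if celeb not in bacon_network:
--         return -1
--     if celeb == "Kevin Bacon":
--         return 0
--     # Bellman-Ford-style synchronous relaxation: no queue, no frontier, no visited set.
--     # dist maps each known-reachable celeb to their bacon number; each round relaxes
--     # every edge of the network against the previous round's table.
--     dist = {"Kevin Bacon": 0}
--     for _ in range(len(bacon_network)):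
--         new = dict(dist)
--         for u, nbrs in bacon_network.items():
--             if u in dist:
--                 for v in nbrs:
--                     if v not in new:
--                         new[v] = dist[u] + 1
--         if len(new) == len(dist):
--             break
--         dist = new
--     return dist.get(celeb, -1)
-- ===== Notes on version B (the rewrite author's own statement) =====
-- stated objective: alternative
-- what changed: Replaces BFS (deque of (node,distance) pairs + visited set) with Bellman-Ford-style synchronous relaxation: a distance table seeded with Kevin Bacon is repeatedly relaxed over the whole edge list (one pass per round, up to len(network) rounds, stopping at a fixpoint), and the answer is read off the table; no queue, frontier or visited set.
-- outside the precondition, e.g. on bacon_number({'Kevin Bacon': ['A'], 'A': ['Z']}, 'A'): A returns 1, B returns 1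
import Mathlib
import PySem

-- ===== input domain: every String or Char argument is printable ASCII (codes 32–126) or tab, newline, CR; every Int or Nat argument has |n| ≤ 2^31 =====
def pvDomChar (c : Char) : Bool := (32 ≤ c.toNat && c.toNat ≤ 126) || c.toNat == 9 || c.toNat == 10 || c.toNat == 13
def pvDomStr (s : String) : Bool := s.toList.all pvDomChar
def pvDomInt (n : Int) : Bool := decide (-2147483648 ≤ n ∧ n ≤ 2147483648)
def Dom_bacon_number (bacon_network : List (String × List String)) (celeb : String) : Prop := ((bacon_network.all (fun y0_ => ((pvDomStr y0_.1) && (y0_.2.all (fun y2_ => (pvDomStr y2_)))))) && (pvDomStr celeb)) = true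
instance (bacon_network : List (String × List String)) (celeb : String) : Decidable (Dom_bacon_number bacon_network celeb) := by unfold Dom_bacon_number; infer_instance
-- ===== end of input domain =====

-- B replaces A's BFS (deque + visited set) by Bellman-Ford-style synchronous relaxation: a
-- distance table repeatedly relaxed over the whole edge list until a fixpoint; equal return
-- values on Pre_ (alternative algorithm, not claimed faster).

-- ===== PORT A =====
-- A's BFS while-loop; fuel counts dequeues (`none` = fuel exhausted, never reached for the fuel
-- chosen below); a missing key on expansion is a Python KeyError (outside Pre_), rendered some (-1).
def baconQueueLoop (bacon_network : List (String × List String)) (celeb : String) :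
    Nat → PySem.Set String → List (String × Int) → Option Int
  | _, _, [] => some (-1)
  | 0, _, _ :: _ => none
  | fuel + 1, visited, (current, distance) :: rest =>
      if visited.contains current then
        baconQueueLoop bacon_network celeb fuel visited rest
      else if current = celeb then some distance
      else
        match bacon_network.lookup current with
        | none => some (-1)   -- Python raises KeyError here; such inputs are outside Pre_
        | some ns =>
            baconQueueLoop bacon_network celeb fuel (PySem.Set.add visited current)
              (rest ++ ns.map (fun person => (person, distance + 1)))

def bacon_number (bacon_network : List (String × List String)) (celeb : String) : Int :=
  if ¬ ((bacon_network.map Prod.fst).contains celeb = true) then -1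
  else if celeb = "Kevin Bacon" then 0
  else
    (baconQueueLoop bacon_network celeb
      (1 + bacon_network.length + (bacon_network.map (fun kv => kv.2.length)).sum)
      PySem.Set.empty [("Kevin Bacon", 0)]).getD (-1)

-- ===== PORT B =====
-- B's inner `for v in nbrs` loop: insert unseen neighbours with distance dist[u] + 1.
def baconRelaxNbrs (dist new : PySem.Dict String Int) (u : String) (nbrs : List String) :
    PySem.Dict String Int :=
  nbrs.foldl (fun new v => if new.contains v then new else new.insert v (dist.getD u 0 + 1)) new

-- B's `for u, nbrs in bacon_network.items()` loop of one relaxation round.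
def baconRelaxRound (dist : PySem.Dict String Int) :
    List (String × List String) → PySem.Dict String Int → PySem.Dict String Int
  | [], new => new
  | (u, nbrs) :: rest, new =>
      baconRelaxRound dist rest (if dist.contains u then baconRelaxNbrs dist new u nbrs else new)

-- B's `for _ in range(len(bacon_network))` loop with the fixpoint break.
def baconRounds (bacon_network : List (String × List String)) :
    Nat → PySem.Dict String Int → PySem.Dict String Int
  | 0, dist => dist
  | n + 1, dist =>
      let new := baconRelaxRound dist bacon_network dist
      if new.size = dist.size then dist else baconRounds bacon_network n new

def bacon_number_alt (bacon_network : List (String × List String)) (celeb : String) : Int :=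
  if ¬ ((bacon_network.map Prod.fst).contains celeb = true) then -1
  else if celeb = "Kevin Bacon" then 0
  else
    (baconRounds bacon_network bacon_network.length
      (PySem.Dict.empty.insert "Kevin Bacon" 0)).getD celeb (-1)

-- ===== PRECONDITION & SPEC =====
-- Pre_ excludes (a) open graphs, on which A's BFS may raise KeyError when it expands a node that
-- is not a key — slightly broader than the exact raising set: a missing key the BFS never expands
-- (unreachable, or the celeb is found first) is also excluded although A returns there; and
-- (b) duplicate keys, impossible for a real Python dict argument (the list encodes a dict).
def Pre_bacon_number (bacon_network : List (String × List String)) (celeb : String) : Prop :=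
  ¬ ((bacon_network.map Prod.fst).contains celeb = true) ∨ celeb = "Kevin Bacon" ∨
  ((bacon_network.map Prod.fst).contains "Kevin Bacon" = true ∧
   (∀ kv ∈ bacon_network, ∀ v ∈ kv.2, (bacon_network.map Prod.fst).contains v = true) ∧
   (bacon_network.map Prod.fst).Nodup)
instance (bacon_network : List (String × List String)) (celeb : String) : Decidable (Pre_bacon_number bacon_network celeb) := by unfold Pre_bacon_number; infer_instance

def pvWitness_bacon_number : (List (String × List String)) × String :=
  ([("Kevin Bacon", ["Al"]), ("Al", ["Kevin Bacon"])], "Al")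

def Spec_bacon_number (bacon_network : List (String × List String)) (celeb : String) (out : Int) : Prop := out = bacon_number_alt bacon_network celeb
instance (bacon_network : List (String × List String)) (celeb : String) (out : Int) : Decidable (Spec_bacon_number bacon_network celeb out) := by unfold Spec_bacon_number; infer_instance

-- ===== CLAIM (what is proved, stated in full; the proofs are below) =====
def Claim_equal_bacon_number : Prop := ∀ (bacon_network : List (String × List String)) (celeb : String), Dom_bacon_number bacon_network celeb → Pre_bacon_number bacon_network celeb → Spec_bacon_number bacon_network celeb (bacon_number bacon_network celeb)

-- ===== LEMMAS AND PROOFS =====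
-- (everything below is proof machinery: a common level-by-level specification `bnLvl` of the
-- breadth layers, which A's queue and B's relaxation table are both proved to follow)

-- adjacency list of u (under Pre_ every expanded node is a key, so the default is never used)
def bnAdj (net : List (String × List String)) (u : String) : List String :=
  (net.lookup u).getD []

-- total neighbour mass of the not-yet-visited keys: the termination potential of BFS
def bnSumN (net : List (String × List String)) (V : PySem.Set String) : Nat :=
  (net.map (fun kv => if V.contains kv.1 then 0 else kv.2.length)).sum

def bnW (net : List (String × List String)) (V : PySem.Set String) (cur nxt : List String) : Nat :=
  cur.length + nxt.length + bnSumN net V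

theorem bnContains_add (V : PySem.Set String) (u k : String) :
    (PySem.Set.add V u).contains k = (V.contains k || k == u) := by
  simp only [PySem.Set.add, PySem.Set.contains]
  by_cases h : List.contains V u = true
  · simp only [h]
    cases hk : (k == u)
    · simp
    · have : k = u := eq_of_beq hk
      subst this
      simp only [List.contains_iff_mem] at h ⊢
      simp [h]
  · simp only [if_neg h]
    simp only [List.contains_append]
    cases hk : (k == u)
    · have : ¬ k = u := fun hh => by rw [hh] at hk; simp at hk
      simp [this]
    · simp [eq_of_beq hk]

theorem bnContains_iff (V : PySem.Set String) (x : String) :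
    V.contains x = true ↔ x ∈ V := by
  simp [PySem.Set.contains]

theorem bnAdd_eq (V : PySem.Set String) (n : String) (hv : V.contains n = false) :
    PySem.Set.add V n = V ++ [n] := by
  simp only [PySem.Set.add]
  rw [hv]
  simp

theorem bnLookup_of_mem_keys (net : List (String × List String)) (x : String)
    (h : (net.map Prod.fst).contains x = true) : ∃ ns, List.lookup x net = some ns := by
  induction net with
  | nil => simp at h
  | cons kv rest ih =>
      obtain ⟨k, vs⟩ := kv
      by_cases hk : k = x
      · subst hk
        exact ⟨vs, by simp [List.lookup]⟩
      · have hbe : (k == x) = false := by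
          cases hbe : (k == x)
          · rfl
          · exact absurd (eq_of_beq hbe) hk
        have : (rest.map Prod.fst).contains x = true := by
          simp only [List.map_cons, List.contains_iff_mem, List.mem_cons] at h
          rcases h with h | h
          · exact absurd h.symm hk
          · simpa [List.contains_iff_mem] using h
        obtain ⟨ns, hns⟩ := ih this
        have hbe' : (x == k) = false := by
          cases hbe' : (x == k)
          · rfl
          · exact absurd (eq_of_beq hbe').symm hk
        exact ⟨ns, by simp [List.lookup, hbe', hns]⟩

theorem bnMem_of_lookup (net : List (String × List String)) (x : String) (ns : List String)
    (h : List.lookup x net = some ns) : (x, ns) ∈ net := by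
  rw [List.lookup_eq_some_iff] at h
  obtain ⟨l1, l2, rfl, -⟩ := h
  simp

theorem bnLookup_of_mem (net : List (String × List String)) (u : String) (ns : List String)
    (hnd : (net.map Prod.fst).Nodup) (h : (u, ns) ∈ net) : List.lookup u net = some ns := by
  induction net with
  | nil => simp at h
  | cons kv rest ih =>
      simp only [List.map_cons, List.nodup_cons] at hnd
      rcases List.mem_cons.mp h with h | h
      · subst h; simp [List.lookup]
      · have hne : kv.1 ≠ u := by
          intro he
          exact hnd.1 (he ▸ (List.mem_map.mpr ⟨(u, ns), h, rfl⟩))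
        have hbe' : (u == kv.1) = false := by
          cases hbe' : (u == kv.1)
          · rfl
          · exact absurd (eq_of_beq hbe').symm hne
        simp [List.lookup, hbe', ih hnd.2 h]

theorem bnSum_mono (net : List (String × List String)) (V V' : PySem.Set String)
    (h : ∀ k, V.contains k = true → V'.contains k = true) : bnSumN net V' ≤ bnSumN net V := by
  induction net with
  | nil => simp [bnSumN]
  | cons kv rest ih =>
      simp only [bnSumN, List.map_cons, List.sum_cons] at ih ⊢
      have hterm : (if V'.contains kv.1 then 0 else kv.2.length)
          ≤ (if V.contains kv.1 then 0 else kv.2.length) := by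
        by_cases hv : V.contains kv.1 = true
        · have hv' := h kv.1 hv
          simp only [bnContains_iff] at hv' hv
          simp [hv', hv]
        · rw [if_neg hv]
          split <;> omega
      omega

theorem bnSum_add_le (net : List (String × List String)) (u : String) (ns : List String)
    (V : PySem.Set String) (hl : net.lookup u = some ns) (hu : V.contains u = false) :
    bnSumN net (PySem.Set.add V u) + ns.length ≤ bnSumN net V := by
  induction net with
  | nil => simp [List.lookup] at hl
  | cons kv rest ih =>
      obtain ⟨k, vs⟩ := kv
      by_cases hk : k = u
      · subst hk
        have hvs : vs = ns := by simpa [List.lookup] using hl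
        subst hvs
        have hmono := bnSum_mono rest V (PySem.Set.add V k)
          (fun j hj => by rw [bnContains_add, hj]; rfl)
        have h1 : (PySem.Set.add V k).contains k = true := by
          rw [bnContains_add]; simp
        simp only [bnSumN, List.map_cons, List.sum_cons] at hmono ⊢
        rw [if_pos h1, if_neg (by rw [hu]; simp)]
        omega
      · have hbe' : (u == k) = false := by
          cases hbe' : (u == k)
          · rfl
          · exact absurd (eq_of_beq hbe').symm hk
        have hl' : List.lookup u rest = some ns := by
          simpa [List.lookup, hbe'] using hl
        have := ih hl'
        simp only [bnSumN, List.map_cons, List.sum_cons, bnContains_add] at this ⊢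
        have hku : (k == u) = false := by
          cases hkk : (k == u)
          · rfl
          · exact absurd (eq_of_beq hkk) hk
        rw [hku]
        simp only [Bool.or_false]
        omega

-- fuel-free form of A's loop, organised level by level (proved equal to the fueled port below)
def bnRun (net : List (String × List String)) (celeb : String) :
    PySem.Set String → List String → List String → Int → Int
  | _, [], [], _ => -1
  | V, [], n :: nxt, d => bnRun net celeb V (n :: nxt) [] (d + 1)
  | V, node :: rest, nxt, d =>
      if V.contains node then bnRun net celeb V rest nxt d
      else if node = celeb then d
      else
        match h : net.lookup node with
        | none => -1
        | some ns => bnRun net celeb (PySem.Set.add V node) rest (nxt ++ ns) d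
  termination_by V cur nxt _ => 2 * bnW net V cur nxt + (if cur = [] then 1 else 0)
  decreasing_by
  · simp [bnW]
  · simp [bnW]; split <;> omega
  · have hu : V.contains node = false := by simp_all
    have := bnSum_add_le net node ns V h hu
    simp [bnW]; split <;> omega

-- A's level-synchronous reading with fuel (bridge between the queue port and bnRun)
def bnLoop (bacon_network : List (String × List String)) (celeb : String) :
    Nat → PySem.Set String → List String → List String → Int → Option Int
  | fuel, visited, [], nxt, d =>
      match nxt with
      | [] => some (-1)
      | _ :: _ => bnLoop bacon_network celeb fuel visited nxt [] (d + 1)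
  | 0, _, _ :: _, _, _ => none
  | fuel + 1, visited, node :: rest, nxt, d =>
      if visited.contains node then
        bnLoop bacon_network celeb fuel visited rest nxt d
      else if node = celeb then some d
      else
        match bacon_network.lookup node with
        | none => some (-1)
        | some ns =>
            bnLoop bacon_network celeb fuel (PySem.Set.add visited node) rest (nxt ++ ns) d
  termination_by fuel _ cur nxt _ => (fuel, nxt.length, cur.length)

-- Simulation invariant: A's queue is always (current level at distance d) ++ (next level at d+1).
theorem queue_eq_level (bacon_network : List (String × List String)) (celeb : String)
    (fuel : Nat) (visited : PySem.Set String) (cur nxt : List String) (d : Int) :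
    baconQueueLoop bacon_network celeb fuel visited
        (cur.map (fun n => (n, d)) ++ nxt.map (fun n => (n, d + 1)))
      = bnLoop bacon_network celeb fuel visited cur nxt d := by
  fun_induction bnLoop bacon_network celeb fuel visited cur nxt d with
  | case1 => simp [baconQueueLoop]
  | case2 fuel visited d h t ih =>
      simpa using ih
  | case3 => simp [baconQueueLoop]
  | case4 => simp_all [baconQueueLoop]
  | case5 => simp_all [baconQueueLoop]
  | case6 _ _ node _ _ _ _ _ hno => simp_all [baconQueueLoop, -List.lookup_eq_none_iff]
  | case7 => simp_all [baconQueueLoop, List.map_append, List.append_assoc]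

-- with enough fuel the fueled loop computes bnRun
theorem bnLoop_eq_bnRun (net : List (String × List String)) (celeb : String)
    (fuel : Nat) (V : PySem.Set String) (cur nxt : List String) (d : Int)
    (h : bnW net V cur nxt ≤ fuel) :
    bnLoop net celeb fuel V cur nxt d = some (bnRun net celeb V cur nxt d) := by
  revert h
  fun_induction bnRun net celeb V cur nxt d generalizing fuel with
  | case1 =>
      intro h
      simp [bnLoop]
  | case2 V n nxt d ih =>
      intro h
      have hW : bnW net V (n :: nxt) [] ≤ fuel := by
        simp only [bnW, List.length_nil, List.length_cons] at h ⊢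
        omega
      simpa [bnLoop] using ih fuel hW
  | case3 V node rest nxt d hvis ih =>
      intro h
      cases fuel with
      | zero =>
          exfalso
          simp only [bnW, List.length_cons] at h
          omega
      | succ f =>
          have hW : bnW net V rest nxt ≤ f := by
            simp only [bnW, List.length_cons] at h ⊢
            omega
          simp only [bnLoop, hvis, if_pos]
          exact ih f hW
  | case4 V rest nxt d hvis =>
      intro h
      cases fuel with
      | zero =>
          exfalso
          simp only [bnW, List.length_cons] at h
          omega
      | succ f =>
          simp [bnLoop]
          intro hm
          exact absurd ((bnContains_iff V celeb).mpr hm) hvis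
  | case5 V node rest nxt d hvis hcel hlk =>
      intro h
      cases fuel with
      | zero =>
          exfalso
          simp only [bnW, List.length_cons] at h
          omega
      | succ f =>
          simp [bnLoop, hcel, hlk, -List.lookup_eq_none_iff]
          intro hm
          exact absurd ((bnContains_iff V node).mpr hm) hvis
  | case6 V node rest nxt d hvis hcel ns hlk ih =>
      intro h
      cases fuel with
      | zero =>
          exfalso
          simp only [bnW, List.length_cons] at h
          omega
      | succ f =>
          have hu : V.contains node = false := by
            cases hc : V.contains node
            · rfl
            · exact absurd hc hvis
          have hsum := bnSum_add_le net node ns V hlk hu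
          have hW : bnW net (PySem.Set.add V node) rest (nxt ++ ns) ≤ f := by
            simp only [bnW, List.length_cons, List.length_append] at h ⊢
            omega
          simp only [bnLoop, hvis, hcel, hlk]
          simp only [Bool.false_eq_true, if_neg, not_false_iff]
          exact ih f hW

-- one BFS level: expand each unvisited node of `cur` in order, collecting neighbours
def bnStep (net : List (String × List String)) :
    PySem.Set String → List String → List String → PySem.Set String × List String
  | V, [], acc => (V, acc)
  | V, n :: cur, acc =>
      if V.contains n then bnStep net V cur acc
      else bnStep net (PySem.Set.add V n) cur (acc ++ bnAdj net n)

-- the canonical breadth layers: (visited set, frontier) after d levels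
def bnLvl (net : List (String × List String)) : Nat → PySem.Set String × List String
  | 0 => (PySem.Set.empty, ["Kevin Bacon"])
  | r + 1 => bnStep net (bnLvl net r).1 (bnLvl net r).2 []

-- the common answer both programs compute: first level whose visited set holds the celeb
def bnAns (net : List (String × List String)) (celeb : String) : Int :=
  match (List.range (net.length + 1)).find? (fun d => ((bnLvl net (d + 1)).1).contains celeb) with
  | some d => (d : Int)
  | none => -1

theorem bnStep_fst_mem (net : List (String × List String)) (V : PySem.Set String)
    (cur acc : List String) (x : String) :
    x ∈ (bnStep net V cur acc).1 ↔ x ∈ V ∨ x ∈ cur := by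
  induction cur generalizing V acc with
  | nil => simp [bnStep]
  | cons n cur ih =>
      by_cases h : V.contains n = true
      · have hn : n ∈ V := (bnContains_iff V n).mp h
        rw [bnStep, if_pos h, ih]
        constructor
        · rintro (hx | hx)
          · exact Or.inl hx
          · exact Or.inr (List.mem_cons_of_mem _ hx)
        · rintro (hx | hx)
          · exact Or.inl hx
          · rcases List.mem_cons.mp hx with rfl | hx
            · exact Or.inl hn
            · exact Or.inr hx
      · rw [bnStep, if_neg h, ih]
        rw [PySem.Set.mem_add]
        constructor
        · rintro ((hx | rfl) | hx)
          · exact Or.inl hx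
          · exact Or.inr (List.mem_cons_self)
          · exact Or.inr (List.mem_cons_of_mem _ hx)
        · rintro (hx | hx)
          · exact Or.inl (Or.inl hx)
          · rcases List.mem_cons.mp hx with rfl | hx
            · exact Or.inl (Or.inr rfl)
            · exact Or.inr hx

theorem bnStep_snd_mem (net : List (String × List String)) (V : PySem.Set String)
    (cur acc : List String) (x : String) :
    x ∈ (bnStep net V cur acc).2 ↔
      x ∈ acc ∨ ∃ u ∈ cur, V.contains u = false ∧ x ∈ bnAdj net u := by
  induction cur generalizing V acc with
  | nil => simp [bnStep]
  | cons n cur ih =>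
      by_cases h : V.contains n = true
      · rw [bnStep, if_pos h, ih]
        constructor
        · rintro (hx | ⟨u, hu, hfu, hxu⟩)
          · exact Or.inl hx
          · exact Or.inr ⟨u, List.mem_cons_of_mem _ hu, hfu, hxu⟩
        · rintro (hx | ⟨u, hu, hfu, hxu⟩)
          · exact Or.inl hx
          · rcases List.mem_cons.mp hu with rfl | hu
            · rw [h] at hfu; cases hfu
            · exact Or.inr ⟨u, hu, hfu, hxu⟩
      · have hf : V.contains n = false := by
          cases hc : V.contains n
          · rfl
          · exact absurd hc h
        rw [bnStep, if_neg h, ih]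
        constructor
        · rintro (hx | ⟨u, hu, hfu, hxu⟩)
          · rcases List.mem_append.mp hx with hx | hx
            · exact Or.inl hx
            · exact Or.inr ⟨n, List.mem_cons_self, hf, hx⟩
          · have hfu' : V.contains u = false := by
              cases hc : V.contains u
              · rfl
              · rw [bnContains_add, hc] at hfu; simp at hfu
            exact Or.inr ⟨u, List.mem_cons_of_mem _ hu, hfu', hxu⟩
        · rintro (hx | ⟨u, hu, hfu, hxu⟩)
          · exact Or.inl (List.mem_append.mpr (Or.inl hx))
          · rcases List.mem_cons.mp hu with rfl | hu
            · exact Or.inl (List.mem_append.mpr (Or.inr hxu))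
            · by_cases hun : u = n
              · subst hun
                exact Or.inl (List.mem_append.mpr (Or.inr hxu))
              · refine Or.inr ⟨u, hu, ?_, hxu⟩
                rw [bnContains_add, hfu]
                have hb : (u == n) = false := by
                  cases hb : (u == n)
                  · rfl
                  · exact absurd (eq_of_beq hb) hun
                rw [hb]
                rfl

theorem bnStep_fst_append (net : List (String × List String)) (V : PySem.Set String)
    (cur acc : List String) :
    ∃ Δ, (bnStep net V cur acc).1 = V ++ Δ ∧ ∀ x ∈ Δ, V.contains x = false := by
  induction cur generalizing V acc with
  | nil => exact ⟨[], by simp [bnStep]⟩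
  | cons n cur ih =>
      by_cases h : V.contains n = true
      · rw [bnStep, if_pos h]; exact ih V acc
      · have hf : V.contains n = false := by
          cases hc : V.contains n
          · rfl
          · exact absurd hc h
        rw [bnStep, if_neg h]
        obtain ⟨Δ, hΔ, hΔf⟩ := ih (PySem.Set.add V n) (acc ++ bnAdj net n)
        refine ⟨n :: Δ, ?_, ?_⟩
        · rw [hΔ, bnAdd_eq V n hf]
          simp
        · intro x hx
          rcases List.mem_cons.mp hx with rfl | hx
          · exact hf
          · have := hΔf x hx
            cases hc : V.contains x
            · rfl
            · rw [bnContains_add, hc] at this; simp at this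

theorem bnStep_snd_of_fst_eq (net : List (String × List String)) (V : PySem.Set String)
    (cur acc : List String) (h : (bnStep net V cur acc).1 = V) :
    (bnStep net V cur acc).2 = acc := by
  induction cur generalizing V acc with
  | nil => simp [bnStep]
  | cons n cur ih =>
      by_cases hv : V.contains n = true
      · rw [bnStep, if_pos hv] at h ⊢
        exact ih V acc h
      · exfalso
        rw [bnStep, if_neg hv] at h
        obtain ⟨Δ, hΔ, -⟩ := bnStep_fst_append net (PySem.Set.add V n) cur (acc ++ bnAdj net n)
        rw [hΔ] at h
        have hlen := congrArg List.length h
        have hf : V.contains n = false := by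
          cases hc : V.contains n
          · rfl
          · exact absurd hc hv
        rw [bnAdd_eq V n hf] at hlen
        simp [List.length_append] at hlen

theorem bnStep_fst_nodup (net : List (String × List String)) (V : PySem.Set String)
    (cur acc : List String) (h : V.Nodup) : ((bnStep net V cur acc).1).Nodup := by
  induction cur generalizing V acc with
  | nil => simpa [bnStep] using h
  | cons n cur ih =>
      by_cases hv : V.contains n = true
      · rw [bnStep, if_pos hv]; exact ih V acc h
      · rw [bnStep, if_neg hv]
        refine ih _ _ ?_
        have hf : V.contains n = false := by
          cases hc : V.contains n
          · rfl
          · exact absurd hc hv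
        have hn : n ∉ V := fun hm => by
          rw [(bnContains_iff V n).mpr hm] at hf; cases hf
        rw [bnAdd_eq V n hf]
        simp [List.nodup_append, h]
        exact fun a ha hh => hn (hh ▸ ha)

theorem bnAdj_keys (net : List (String × List String))
    (hcl : ∀ kv ∈ net, ∀ v ∈ kv.2, (net.map Prod.fst).contains v = true)
    (u x : String) (hx : x ∈ bnAdj net u) : (net.map Prod.fst).contains x = true := by
  unfold bnAdj at hx
  cases hl : List.lookup u net with
  | none => rw [hl] at hx; simp at hx
  | some ns =>
      rw [hl] at hx
      exact hcl (u, ns) (bnMem_of_lookup net u ns hl) x hx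

theorem bnLvl_fst_nodup (net : List (String × List String)) (r : Nat) :
    ((bnLvl net r).1).Nodup := by
  induction r with
  | zero => simp [bnLvl, PySem.Set.empty]
  | succ r ih => exact bnStep_fst_nodup net _ _ _ ih

-- monotonicity of the visited sets
theorem bnLvl_mono (net : List (String × List String)) (r s : Nat) (h : r ≤ s) (x : String)
    (hx : ((bnLvl net r).1).contains x = true) : ((bnLvl net s).1).contains x = true := by
  induction s, h using Nat.le_induction with
  | base => exact hx
  | succ s hs ih =>
      rw [bnContains_iff] at ih ⊢
      exact (bnStep_fst_mem net _ _ _ x).mpr (Or.inl ih)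

theorem bnLvl_snd_next (net : List (String × List String)) (r : Nat) (x : String)
    (hx : x ∈ (bnLvl net r).2) : ((bnLvl net (r + 1)).1).contains x = true := by
  rw [bnContains_iff]
  exact (bnStep_fst_mem net _ _ _ x).mpr (Or.inr hx)

theorem bnLvl_subset_keys (net : List (String × List String))
    (hkb : (net.map Prod.fst).contains "Kevin Bacon" = true)
    (hcl : ∀ kv ∈ net, ∀ v ∈ kv.2, (net.map Prod.fst).contains v = true) (r : Nat) :
    (∀ x, ((bnLvl net r).1).contains x = true → (net.map Prod.fst).contains x = true) ∧
    (∀ x ∈ (bnLvl net r).2, (net.map Prod.fst).contains x = true) := by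
  induction r with
  | zero =>
      constructor
      · intro x hx
        simp [bnLvl, PySem.Set.empty, PySem.Set.contains] at hx
      · intro x hx
        simp only [bnLvl, List.mem_singleton] at hx
        subst hx
        exact hkb
  | succ r ih =>
      constructor
      · intro x hx
        rw [bnContains_iff] at hx
        rcases (bnStep_fst_mem net _ _ _ x).mp hx with hx | hx
        · exact ih.1 x ((bnContains_iff _ x).mpr hx)
        · exact ih.2 x hx
      · intro x hx
        rcases (bnStep_snd_mem net _ _ _ x).mp hx with hx | ⟨u, hu, -, hxu⟩
        · simp at hx
        · exact bnAdj_keys net hcl u x hxu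

-- neighbours of a visited node are visited two levels on
theorem bnLvl_adj (net : List (String × List String)) (r : Nat) (u v : String)
    (hu : ((bnLvl net (r + 1)).1).contains u = true) (hv : v ∈ bnAdj net u) :
    ((bnLvl net (r + 2)).1).contains v = true := by
  induction r generalizing u v with
  | zero =>
      rw [bnContains_iff] at hu
      rcases (bnStep_fst_mem net _ _ _ u).mp hu with hu | hu
      · simp [bnLvl, PySem.Set.empty] at hu
      · simp only [bnLvl, List.mem_singleton] at hu
        subst hu
        apply bnLvl_snd_next
        refine (bnStep_snd_mem net _ _ _ v).mpr (Or.inr ⟨"Kevin Bacon", ?_, ?_, hv⟩)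
        · simp [bnLvl]
        · simp [bnLvl, PySem.Set.empty, PySem.Set.contains]
  | succ r ih =>
      rw [bnContains_iff] at hu
      rcases (bnStep_fst_mem net _ _ _ u).mp hu with hu | hu
      · exact bnLvl_mono net (r + 2) (r + 3) (by omega) v
          (ih u v ((bnContains_iff _ u).mpr hu) hv)
      · by_cases hc : ((bnLvl net (r + 1)).1).contains u = true
        · exact bnLvl_mono net (r + 2) (r + 3) (by omega) v (ih u v hc hv)
        · have hf : ((bnLvl net (r + 1)).1).contains u = false := by
            cases hcc : ((bnLvl net (r + 1)).1).contains u
            · rfl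
            · exact absurd hcc hc
          apply bnLvl_snd_next
          exact (bnStep_snd_mem net _ _ _ v).mpr (Or.inr ⟨u, hu, hf, hv⟩)

theorem bnLvl_stable (net : List (String × List String)) (r : Nat) (V : PySem.Set String)
    (h : bnLvl net r = (V, [])) : ∀ s, r ≤ s → bnLvl net s = (V, []) := by
  intro s hs
  induction s, hs using Nat.le_induction with
  | base => exact h
  | succ s hs ih => rw [bnLvl, ih, bnStep]

-- after net.length levels everything stabilises with an empty frontier
theorem bnLvl_top (net : List (String × List String))
    (hkb : (net.map Prod.fst).contains "Kevin Bacon" = true)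
    (hcl : ∀ kv ∈ net, ∀ v ∈ kv.2, (net.map Prod.fst).contains v = true) :
    ∀ s, net.length + 1 ≤ s → bnLvl net s = ((bnLvl net (net.length + 1)).1, []) := by
  have grow : ∀ r : Nat, (∃ V, ∀ s, r + 1 ≤ s → bnLvl net s = (V, [])) ∨
      r + 1 ≤ ((bnLvl net (r + 1)).1).length := by
    intro r
    induction r with
    | zero =>
        right
        have h0 : (PySem.Set.empty : PySem.Set String).contains "Kevin Bacon" = false := rfl
        show 1 ≤ ((bnStep net (bnLvl net 0).1 (bnLvl net 0).2 []).1).length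
        have : (bnLvl net 0).1 = PySem.Set.empty := rfl
        obtain ⟨Δ, hΔ, -⟩ := bnStep_fst_append net (bnLvl net 0).1 (bnLvl net 0).2 []
        have hm : "Kevin Bacon" ∈ (bnStep net (bnLvl net 0).1 (bnLvl net 0).2 []).1 :=
          (bnStep_fst_mem net _ _ _ _).mpr (Or.inr (by simp [bnLvl]))
        have := List.length_pos_of_mem hm
        omega
    | succ r ih =>
        rcases ih with ⟨V, hst⟩ | hlen
        · exact Or.inl ⟨V, fun s hs => hst s (by omega)⟩
        · obtain ⟨Δ, hΔ, -⟩ := bnStep_fst_append net (bnLvl net (r + 1)).1 (bnLvl net (r + 1)).2 []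
          cases Δ with
          | nil =>
              have hfst : (bnStep net (bnLvl net (r + 1)).1 (bnLvl net (r + 1)).2 []).1
                  = (bnLvl net (r + 1)).1 := by simpa using hΔ
              have hsnd := bnStep_snd_of_fst_eq net _ _ _ hfst
              have hlv : bnLvl net (r + 2) = ((bnLvl net (r + 1)).1, []) := by
                rw [bnLvl]
                exact Prod.ext hfst hsnd
              exact Or.inl ⟨(bnLvl net (r + 1)).1, fun s hs =>
                bnLvl_stable net (r + 2) _ hlv s (by omega)⟩
          | cons a Δ' =>
              right
              have : (bnLvl net (r + 2)).1 = (bnLvl net (r + 1)).1 ++ (a :: Δ') := by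
                rw [bnLvl]; exact hΔ
              rw [this]
              simp only [List.length_append, List.length_cons]
              omega
  rcases grow net.length with ⟨V, hst⟩ | hlen
  · intro s hs
    rw [hst s hs, hst (net.length + 1) (by omega)]
  · exfalso
    have hsub : (bnLvl net (net.length + 1)).1 ⊆ net.map Prod.fst := by
      intro x hx
      have := (bnLvl_subset_keys net hkb hcl (net.length + 1)).1 x ((bnContains_iff _ x).mpr hx)
      exact (List.contains_iff_mem).mp this
    have := (List.subperm_of_subset (bnLvl_fst_nodup net (net.length + 1)) hsub).length_le
    simp at this
    omega

-- A follows the levels: one level of bnRun is one bnStep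
theorem bnRun_step (net : List (String × List String)) (celeb : String)
    (V : PySem.Set String) (cur acc : List String) (d : Int)
    (hcel : V.contains celeb = false)
    (hks : ∀ n ∈ cur, (net.map Prod.fst).contains n = true) :
    bnRun net celeb V cur acc d =
      if celeb ∈ cur then d
      else if (bnStep net V cur acc).2 = [] then -1
      else bnRun net celeb (bnStep net V cur acc).1 (bnStep net V cur acc).2 [] (d + 1) := by
  induction cur generalizing V acc with
  | nil =>
      cases acc with
      | nil => simp [bnRun, bnStep]
      | cons a as =>
          simp only [bnStep, List.not_mem_nil, if_neg, not_false_iff, List.cons_ne_nil]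
          conv_lhs => rw [bnRun.eq_def]
  | cons n cur ih =>
      by_cases hv : V.contains n = true
      · have hncel : n ≠ celeb := by
          intro he
          rw [he, hcel] at hv
          cases hv
        have hstep : bnStep net V (n :: cur) acc = bnStep net V cur acc := by
          rw [bnStep, if_pos hv]
        conv_lhs => rw [bnRun.eq_def]
        simp only [hv, if_pos]
        rw [ih V acc hcel (fun m hm => hks m (List.mem_cons_of_mem _ hm)), hstep]
        have hmem : celeb ∈ n :: cur ↔ celeb ∈ cur := by
          simp [List.mem_cons, Ne.symm hncel]
        rw [if_congr hmem rfl rfl]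
      · by_cases hnc : n = celeb
        · subst hnc
          conv_lhs => rw [bnRun.eq_def]
          simp
          intro hm
          exact absurd ((bnContains_iff V n).mpr hm) hv
        · obtain ⟨ns, hlk⟩ := bnLookup_of_mem_keys net n (hks n List.mem_cons_self)
          have hf : V.contains n = false := by
            cases hc : V.contains n
            · rfl
            · exact absurd hc hv
          have hstep : bnStep net V (n :: cur) acc
              = bnStep net (PySem.Set.add V n) cur (acc ++ ns) := by
            rw [bnStep, if_neg hv]
            have : bnAdj net n = ns := by simp [bnAdj, hlk]
            rw [this]
          conv_lhs => rw [bnRun.eq_def]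
          simp only [hv, hnc, Bool.false_eq_true, if_neg, not_false_iff]
          have hcel' : (PySem.Set.add V n).contains celeb = false := by
            rw [bnContains_add, hcel]
            have : (celeb == n) = false := by
              cases hb : (celeb == n)
              · rfl
              · exact absurd (eq_of_beq hb).symm hnc
            rw [this]
            rfl
          split
          · next heq => rw [hlk] at heq; cases heq
          · next ns2 heq =>
              rw [hlk] at heq
              injection heq with he
              subst he
              rw [ih (PySem.Set.add V n) (acc ++ ns) hcel'
                (fun m hm => hks m (List.mem_cons_of_mem _ hm)), ← hstep]
              have hmem : celeb ∈ n :: cur ↔ celeb ∈ cur := by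
                rw [List.mem_cons]
                constructor
                · rintro (rfl | hx)
                  · exact absurd rfl hnc
                  · exact hx
                · exact Or.inr
              rw [if_congr hmem rfl rfl]

theorem bnFind_range_some (p : Nat → Bool) (n r : Nat) (hr : r < n) (hp : p r = true)
    (hlt : ∀ d, d < r → p d = false) : (List.range n).find? p = some r := by
  have hn : n = r + (n - r) := by omega
  rw [hn, List.range_add, List.find?_append]
  have h1 : (List.range r).find? p = none := by
    rw [List.find?_eq_none]
    intro x hx
    simp only [List.mem_range] at hx
    rw [hlt x hx]
    simp
  rw [h1]
  have hm : n - r = (n - r - 1) + 1 := by omega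
  rw [hm, List.range_succ_eq_map]
  simp [hp]

-- A computes bnAns
theorem bnRun_eq_ans (net : List (String × List String)) (celeb : String)
    (hkb : (net.map Prod.fst).contains "Kevin Bacon" = true)
    (hcl : ∀ kv ∈ net, ∀ v ∈ kv.2, (net.map Prod.fst).contains v = true) :
    bnRun net celeb PySem.Set.empty ["Kevin Bacon"] [] 0 = bnAns net celeb := by
  have main : ∀ m r : Nat, r + m = net.length + 1 →
      ((bnLvl net r).1).contains celeb = false →
      bnRun net celeb (bnLvl net r).1 (bnLvl net r).2 [] (r : Int) = bnAns net celeb := by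
    intro m
    induction m with
    | zero =>
        intro r hr hcel
        have hrN : r = net.length + 1 := by omega
        subst hrN
        have htop := bnLvl_top net hkb hcl (net.length + 1) (by omega)
        have hC : (bnLvl net (net.length + 1)).2 = [] := by
          rw [htop]
        rw [hC]
        have hans : bnAns net celeb = -1 := by
          unfold bnAns
          rw [List.find?_eq_none.mpr]
          intro d hd
          simp only [List.mem_range] at hd
          intro hp
          have := bnLvl_mono net (d + 1) (net.length + 1) (by omega) celeb hp
          rw [this] at hcel
          cases hcel
        rw [hans]
        simp [bnRun]
    | succ m ih =>
        intro r hr hcel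
        have hks := (bnLvl_subset_keys net hkb hcl r).2
        rw [bnRun_step net celeb (bnLvl net r).1 (bnLvl net r).2 [] (r : Int) hcel hks]
        have hstep1 : (bnStep net (bnLvl net r).1 (bnLvl net r).2 []).1 = (bnLvl net (r + 1)).1 := rfl
        have hstep2 : (bnStep net (bnLvl net r).1 (bnLvl net r).2 []).2 = (bnLvl net (r + 1)).2 := rfl
        rw [hstep1, hstep2]
        by_cases hc : celeb ∈ (bnLvl net r).2
        · rw [if_pos hc]
          have hp : ((bnLvl net (r + 1)).1).contains celeb = true := bnLvl_snd_next net r celeb hc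
          have hlt : ∀ d, d < r → ((bnLvl net (d + 1)).1).contains celeb = false := by
            intro d hd
            cases hpd : ((bnLvl net (d + 1)).1).contains celeb
            · rfl
            · exfalso
              have := bnLvl_mono net (d + 1) r (by omega) celeb hpd
              rw [this] at hcel
              cases hcel
          have hans : bnAns net celeb = (r : Int) := by
            unfold bnAns
            rw [bnFind_range_some (fun d => ((bnLvl net (d + 1)).1).contains celeb)
              (net.length + 1) r (by omega) hp hlt]
          rw [hans]
        · rw [if_neg hc]
          have hcel' : ((bnLvl net (r + 1)).1).contains celeb = false := by
            cases hcc : ((bnLvl net (r + 1)).1).contains celeb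
            · rfl
            · exfalso
              rw [bnContains_iff] at hcc
              rcases (bnStep_fst_mem net _ _ _ celeb).mp hcc with hx | hx
              · rw [(bnContains_iff _ celeb).mpr hx] at hcel; cases hcel
              · exact hc hx
          by_cases hC : (bnLvl net (r + 1)).2 = []
          · rw [if_pos hC]
            have hlv : bnLvl net (r + 1) = ((bnLvl net (r + 1)).1, []) := by
              exact Prod.ext rfl hC
            have hans : bnAns net celeb = -1 := by
              unfold bnAns
              rw [List.find?_eq_none.mpr]
              intro d hd
              simp only [List.mem_range] at hd
              intro hp
              by_cases hdr : d + 1 ≤ r + 1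
              · have := bnLvl_mono net (d + 1) (r + 1) hdr celeb hp
                rw [this] at hcel'
                cases hcel'
              · have hst := bnLvl_stable net (r + 1) _ hlv (d + 1) (by omega)
                have : ((bnLvl net (d + 1)).1) = (bnLvl net (r + 1)).1 := by rw [hst]
                rw [this] at hp
                rw [hp] at hcel'
                cases hcel'
            rw [hans]
          · rw [if_neg hC]
            have hcast : ((r : Int) + 1) = ((r + 1 : Nat) : Int) := by push_cast; ring
            rw [hcast]
            exact ih (r + 1) (by omega) hcel'
  have h0 : (bnLvl net 0).1 = PySem.Set.empty := rfl
  have h0' : (bnLvl net 0).2 = ["Kevin Bacon"] := rfl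
  have := main (net.length + 1) 0 (by omega) (by rw [h0]; rfl)
  rw [h0, h0'] at this
  exact_mod_cast this

-- B's table after r rounds: exactly the nodes of level set r+1, each with its exact level
def bnRep (net : List (String × List String)) (dist : PySem.Dict String Int) (r : Nat) : Prop :=
  dist.keys.Nodup ∧
  (∀ v, dist.contains v = ((bnLvl net (r + 1)).1).contains v) ∧
  (∀ v k, dist.get? v = some k → ∃ m : Nat, k = (m : Int) ∧
      ((bnLvl net (m + 1)).1).contains v = true ∧ ((bnLvl net m).1).contains v = false)

theorem bnNbrs_contains (dist : PySem.Dict String Int) (u : String) (nbrs : List String)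
    (new : PySem.Dict String Int) (v : String) :
    (baconRelaxNbrs dist new u nbrs).contains v = (new.contains v || nbrs.contains v) := by
  induction nbrs generalizing new with
  | nil => simp [baconRelaxNbrs]
  | cons x xs ih =>
      simp only [baconRelaxNbrs, List.foldl_cons] at ih ⊢
      by_cases hx : new.contains x = true
      · rw [if_pos hx, ih]
        cases hb : (v == x)
        · have hne : ¬ v = x := fun he => by rw [he] at hb; simp at hb
          simp [hne]
        · have : v = x := eq_of_beq hb
          subst this
          simp [hx]
      · rw [if_neg hx, ih, PySem.Dict.contains_insert]
        cases hb : (v == x)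
        · simp only [Bool.false_or]
          have hne : ¬ v = x := fun he => by rw [he] at hb; simp at hb
          simp [hne]
        · have : v = x := eq_of_beq hb
          subst this
          simp
  
theorem bnRound_contains (dist : PySem.Dict String Int) (L : List (String × List String))
    (new : PySem.Dict String Int) (v : String) :
    (baconRelaxRound dist L new).contains v
      = (new.contains v || L.any (fun kv => dist.contains kv.1 && kv.2.contains v)) := by
  induction L generalizing new with
  | nil => simp [baconRelaxRound]
  | cons kv L ih =>
      obtain ⟨u, nbrs⟩ := kv
      simp only [baconRelaxRound]
      rw [ih]
      by_cases hu : dist.contains u = true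
      · rw [if_pos hu, bnNbrs_contains]
        simp [hu, Bool.or_assoc]
      · have hf : dist.contains u = false := by
          cases hc : dist.contains u
          · rfl
          · exact absurd hc hu
        rw [if_neg hu]
        simp [hf]

-- the in-round invariant of B's partially built table `new`
def bnMid (net : List (String × List String)) (dist new : PySem.Dict String Int) (r : Nat) : Prop :=
  new.keys.Nodup ∧
  (∀ v, dist.contains v = true → new.get? v = dist.get? v) ∧
  (∀ v, new.contains v = true → ((bnLvl net (r + 2)).1).contains v = true) ∧
  (∀ v k, new.get? v = some k → ∃ m : Nat, k = (m : Int) ∧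
      ((bnLvl net (m + 1)).1).contains v = true ∧ ((bnLvl net m).1).contains v = false)

theorem bnInsert_mid (net : List (String × List String)) (dist new : PySem.Dict String Int)
    (r : Nat) (u v : String)
    (hrep : bnRep net dist r) (hmid : bnMid net dist new r)
    (hu : dist.contains u = true) (hv : v ∈ bnAdj net u) :
    bnMid net dist (if new.contains v then new else new.insert v (dist.getD u 0 + 1)) r := by
  by_cases hc : new.contains v = true
  · rw [if_pos hc]
    exact hmid
  · have hcf : new.contains v = false := by
      cases hcc : new.contains v
      · rfl
      · exact absurd hcc hc
    rw [if_neg hc]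
    obtain ⟨hnd, hpres, hup, hval⟩ := hmid
    obtain ⟨hdnd, hdom, hdval⟩ := hrep
    -- dist's keys all live inside new already
    have hdin : ∀ w, dist.contains w = true → new.contains w = true := by
      intro w hw
      rw [PySem.Dict.contains_eq_isSome_get?, hpres w hw,
        ← PySem.Dict.contains_eq_isSome_get?]
      exact hw
    have hvd : dist.contains v = false := by
      cases hcc : dist.contains v
      · rfl
      · rw [hdin v hcc] at hcf; cases hcf
    -- u's stored value is its exact level m ≤ r
    obtain ⟨ku, hku⟩ : ∃ k, dist.get? u = some k := by
      rw [PySem.Dict.contains_eq_isSome_get?] at hu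
      exact Option.isSome_iff_exists.mp hu
    obtain ⟨m, rfl, hm1, hm0⟩ := hdval u ku hku
    have hmr : m ≤ r := by
      by_contra hmr
      have := bnLvl_mono net (r + 1) m (by omega) u ((hdom u) ▸ hu)
      rw [this] at hm0
      cases hm0
    have hgd : dist.getD u 0 = (m : Int) := PySem.Dict.getD_of_get?_eq_some dist 0 hku
    refine ⟨PySem.Dict.nodup_keys_insert new v _ hnd, ?_, ?_, ?_⟩
    · intro w hw
      have : w ≠ v := fun he => by rw [he, hvd] at hw; cases hw
      rw [PySem.Dict.get?_insert_of_ne new _ this]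
      exact hpres w hw
    · intro w hw
      rw [PySem.Dict.contains_insert] at hw
      cases hb : (w == v)
      · rw [hb] at hw
        simp only [Bool.false_or] at hw
        exact hup w hw
      · have : w = v := eq_of_beq hb
        subst this
        exact bnLvl_adj net r u w ((hdom u) ▸ hu) hv
    · intro w k hk
      by_cases hwv : w = v
      · subst hwv
        rw [PySem.Dict.get?_insert] at hk
        rw [if_pos rfl] at hk
        injection hk with hk
        refine ⟨m + 1, by rw [← hk, hgd]; push_cast; ring, ?_, ?_⟩
        · exact bnLvl_adj net m u w hm1 hv
        · have hvr : ((bnLvl net (r + 1)).1).contains w = false := (hdom w) ▸ hvd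
          cases hcc : ((bnLvl net (m + 1)).1).contains w
          · rfl
          · have := bnLvl_mono net (m + 1) (r + 1) (by omega) w hcc
            rw [this] at hvr
            cases hvr
      · rw [PySem.Dict.get?_insert_of_ne new _ hwv] at hk
        exact hval w k hk

theorem bnNbrs_mid (net : List (String × List String)) (dist : PySem.Dict String Int)
    (r : Nat) (u : String) (nbrs : List String) (new : PySem.Dict String Int)
    (hrep : bnRep net dist r) (hmid : bnMid net dist new r)
    (hu : dist.contains u = true) (hsub : ∀ v ∈ nbrs, v ∈ bnAdj net u) :
    bnMid net dist (baconRelaxNbrs dist new u nbrs) r := by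
  induction nbrs generalizing new with
  | nil => simpa [baconRelaxNbrs] using hmid
  | cons x xs ih =>
      simp only [baconRelaxNbrs, List.foldl_cons]
      exact ih _
        (bnInsert_mid net dist new r u x hrep hmid hu (hsub x List.mem_cons_self))
        (fun v hvm => hsub v (List.mem_cons_of_mem _ hvm))

theorem bnRound_mid (net : List (String × List String)) (dist : PySem.Dict String Int)
    (r : Nat) (L : List (String × List String)) (new : PySem.Dict String Int)
    (hnd : (net.map Prod.fst).Nodup)
    (hrep : bnRep net dist r) (hmid : bnMid net dist new r)
    (hL : ∀ kv ∈ L, kv ∈ net) :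
    bnMid net dist (baconRelaxRound dist L new) r := by
  induction L generalizing new with
  | nil => simpa [baconRelaxRound] using hmid
  | cons kv L ih =>
      obtain ⟨u, nbrs⟩ := kv
      simp only [baconRelaxRound]
      by_cases hu : dist.contains u = true
      · rw [if_pos hu]
        refine ih _ ?_ (fun p hp => hL p (List.mem_cons_of_mem _ hp))
        have hlk : List.lookup u net = some nbrs :=
          bnLookup_of_mem net u nbrs hnd (hL (u, nbrs) List.mem_cons_self)
        have hadj : bnAdj net u = nbrs := by simp [bnAdj, hlk]
        exact bnNbrs_mid net dist r u nbrs new hrep hmid hu (fun v hvm => hadj ▸ hvm)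
      · rw [if_neg hu]
        exact ih _ hmid (fun p hp => hL p (List.mem_cons_of_mem _ hp))

theorem bnRound_rep (net : List (String × List String)) (dist : PySem.Dict String Int) (r : Nat)
    (hnd : (net.map Prod.fst).Nodup)
    (h : bnRep net dist r) : bnRep net (baconRelaxRound dist net dist) (r + 1) := by
  obtain ⟨hdnd, hdom, hdval⟩ := h
  have hmid0 : bnMid net dist dist r := by
    refine ⟨hdnd, fun v _ => rfl, ?_, hdval⟩
    intro v hv
    exact bnLvl_mono net (r + 1) (r + 2) (by omega) v ((hdom v) ▸ hv)
  have hmid := bnRound_mid net dist r net dist hnd ⟨hdnd, hdom, hdval⟩ hmid0 (fun kv hkv => hkv)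
  obtain ⟨hnd2, hpres, hup, hval⟩ := hmid
  refine ⟨hnd2, ?_, hval⟩
  intro v
  cases hcc : ((bnLvl net (r + 2)).1).contains v
  · cases hrc : (baconRelaxRound dist net dist).contains v
    · rfl
    · rw [hup v hrc] at hcc; cases hcc
  · rw [bnContains_iff] at hcc
    rcases (bnStep_fst_mem net (bnLvl net (r + 1)).1 (bnLvl net (r + 1)).2 [] v).mp hcc
      with hx | hx
    · have hdv : dist.contains v = true := by
        rw [hdom v, bnContains_iff]
        exact hx
      rw [PySem.Dict.contains_eq_isSome_get?, hpres v hdv,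
        ← PySem.Dict.contains_eq_isSome_get?]
      exact hdv
    · rcases (bnStep_snd_mem net (bnLvl net r).1 (bnLvl net r).2 [] v).mp hx
        with hx0 | ⟨u, hu, huf, hvu⟩
      · simp at hx0
      · have hud : dist.contains u = true := by
          rw [hdom u]
          exact bnLvl_snd_next net r u hu
        have hex : ∃ ns, List.lookup u net = some ns ∧ v ∈ ns := by
          unfold bnAdj at hvu
          cases hlk : List.lookup u net with
          | none => rw [hlk] at hvu; simp at hvu
          | some ns => rw [hlk] at hvu; exact ⟨ns, rfl, hvu⟩
        obtain ⟨ns, hlk, hvn⟩ := hex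
        rw [bnRound_contains]
        have hany : net.any (fun kv => dist.contains kv.1 && kv.2.contains v) = true := by
          rw [List.any_eq_true]
          exact ⟨(u, ns), bnMem_of_lookup net u ns hlk, by
            simp [hud, hvn]⟩
        rw [hany]
        simp

theorem bnRounds_final (net : List (String × List String)) (n r : Nat)
    (dist : PySem.Dict String Int)
    (hnd : (net.map Prod.fst).Nodup)
    (hrn : r + n = net.length) (h : bnRep net dist r) :
    (∀ v, (baconRounds net n dist).contains v
        = ((bnLvl net (net.length + 1)).1).contains v) ∧
    ((baconRounds net n dist).keys.Nodup) ∧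
    (∀ v k, (baconRounds net n dist).get? v = some k → ∃ m : Nat, k = (m : Int) ∧
        ((bnLvl net (m + 1)).1).contains v = true ∧ ((bnLvl net m).1).contains v = false) := by
  induction n generalizing r dist with
  | zero =>
      have hrN : r = net.length := by omega
      subst hrN
      obtain ⟨hdnd, hdom, hdval⟩ := h
      simp only [baconRounds]
      exact ⟨fun v => hdom v, hdnd, hdval⟩
  | succ n ih =>
      have hrep' := bnRound_rep net dist r hnd h
      by_cases hsz : (baconRelaxRound dist net dist).size = dist.size
      · simp only [baconRounds, hsz, if_pos]
        obtain ⟨hdnd, hdom, hdval⟩ := h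
        obtain ⟨hnd2, hdom2, hval2⟩ := hrep'
        have hcR : ∀ x, dist.contains x = true → (baconRelaxRound dist net dist).contains x = true := by
          intro x hx
          rw [bnRound_contains, hx]
          rfl
        have hsub : dist.keys ⊆ (baconRelaxRound dist net dist).keys := by
          intro x hx
          rw [← PySem.Dict.contains_iff_mem_keys]
          exact hcR x ((PySem.Dict.contains_iff_mem_keys dist x).mpr hx)
        have hklen : ∀ (d : PySem.Dict String Int), d.keys.length = d.size := by
          intro d
          simp [PySem.Dict.keys, PySem.Dict.size]
        have hlen : (baconRelaxRound dist net dist).keys.length = dist.keys.length := by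
          rw [hklen, hklen, hsz]
        have hperm := (List.subperm_of_subset hdnd hsub).perm_of_length_le (by omega)
        have hceq : ∀ v, (baconRelaxRound dist net dist).contains v = dist.contains v := by
          intro v
          cases hc1 : dist.contains v
          · cases hc2 : (baconRelaxRound dist net dist).contains v
            · rfl
            · exfalso
              have hm := (PySem.Dict.contains_iff_mem_keys _ v).mp hc2
              have := (PySem.Dict.contains_iff_mem_keys dist v).mpr (hperm.mem_iff.mpr hm)
              rw [this] at hc1
              cases hc1
          · exact hcR v hc1
        have hVeq : ∀ v, ((bnLvl net (r + 2)).1).contains v = ((bnLvl net (r + 1)).1).contains v := by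
          intro v
          rw [← hdom2 v, hceq v, hdom v]
        obtain ⟨Δ, hΔ, hΔf⟩ := bnStep_fst_append net (bnLvl net (r + 1)).1 (bnLvl net (r + 1)).2 []
        have hΔnil : Δ = [] := by
          cases hd : Δ with
          | nil => rfl
          | cons a Δ' =>
              exfalso
              have ham : a ∈ (bnLvl net (r + 2)).1 := by
                show a ∈ (bnStep net (bnLvl net (r + 1)).1 (bnLvl net (r + 1)).2 []).1
                rw [hΔ, hd]
                simp
              have h1 : ((bnLvl net (r + 2)).1).contains a = true := (bnContains_iff _ a).mpr ham
              rw [hVeq a] at h1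
              have h2 := hΔf a (by rw [hd]; exact List.mem_cons_self)
              rw [h1] at h2
              cases h2
        have hfst : (bnStep net (bnLvl net (r + 1)).1 (bnLvl net (r + 1)).2 []).1
            = (bnLvl net (r + 1)).1 := by
          rw [hΔ, hΔnil]
          simp
        have hsnd := bnStep_snd_of_fst_eq net _ _ _ hfst
        have hlv : bnLvl net (r + 2) = ((bnLvl net (r + 1)).1, []) := Prod.ext hfst hsnd
        have hst := bnLvl_stable net (r + 2) _ hlv (net.length + 1) (by omega)
        refine ⟨?_, hdnd, hdval⟩
        intro v
        rw [hdom v, show (bnLvl net (net.length + 1)).1 = (bnLvl net (r + 1)).1 from by rw [hst]]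
      · simp only [baconRounds, hsz, if_neg, not_false_iff]
        exact ih (r + 1) _ (by omega) hrep'

-- B computes bnAns
theorem bnRounds_eq_ans (net : List (String × List String)) (celeb : String)
    (hnd : (net.map Prod.fst).Nodup) :
    (baconRounds net net.length (PySem.Dict.empty.insert "Kevin Bacon" 0)).getD celeb (-1)
      = bnAns net celeb := by
  have hkb1 : ((bnLvl net 1).1).contains "Kevin Bacon" = true := by
    rw [bnContains_iff]
    exact (bnStep_fst_mem net (bnLvl net 0).1 (bnLvl net 0).2 [] _).mpr
      (Or.inr (by simp [bnLvl]))
  have hrep0 : bnRep net (PySem.Dict.empty.insert "Kevin Bacon" 0) 0 := by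
    refine ⟨PySem.Dict.nodup_keys_insert _ _ _ PySem.Dict.nodup_keys_empty, ?_, ?_⟩
    · intro v
      rw [PySem.Dict.contains_insert, PySem.Dict.contains_empty]
      cases hb : (v == "Kevin Bacon")
      · simp only [Bool.or_false]
        have hne : ¬ v = "Kevin Bacon" := fun he => by rw [he] at hb; simp at hb
        cases hcc : ((bnLvl net 1).1).contains v
        · rfl
        · exfalso
          rw [bnContains_iff] at hcc
          rcases (bnStep_fst_mem net (bnLvl net 0).1 (bnLvl net 0).2 [] v).mp hcc with hx | hx
          · simp [bnLvl, PySem.Set.empty] at hx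
          · simp only [bnLvl, List.mem_singleton] at hx
            exact hne hx
      · have hv : v = "Kevin Bacon" := eq_of_beq hb
        subst hv
        simp only [Bool.or_false]
        exact (hkb1.symm : _)
    · intro v k hk
      rw [PySem.Dict.get?_insert] at hk
      by_cases hv : v = "Kevin Bacon"
      · rw [if_pos hv] at hk
        injection hk with hk
        subst hv
        refine ⟨0, by rw [← hk]; rfl, hkb1, rfl⟩
      · rw [if_neg hv, PySem.Dict.get?_empty] at hk
        cases hk
  obtain ⟨hdom, hnd2, hval⟩ :=
    bnRounds_final net net.length 0 _ hnd (by omega) hrep0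
  cases hcc : ((bnLvl net (net.length + 1)).1).contains celeb
  · have hg : (baconRounds net net.length (PySem.Dict.empty.insert "Kevin Bacon" 0)).get? celeb
        = none := by
      cases hg : (baconRounds net net.length (PySem.Dict.empty.insert "Kevin Bacon" 0)).get? celeb
      · rfl
      · exfalso
        have hct : (baconRounds net net.length
            (PySem.Dict.empty.insert "Kevin Bacon" 0)).contains celeb = true := by
          rw [PySem.Dict.contains_eq_isSome_get?, hg]
          rfl
        rw [hdom celeb, hcc] at hct
        cases hct
    rw [PySem.Dict.getD_of_get?_eq_none _ _ hg]
    have hans : bnAns net celeb = -1 := by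
      unfold bnAns
      rw [List.find?_eq_none.mpr]
      intro d hd
      simp only [List.mem_range] at hd
      intro hp
      have := bnLvl_mono net (d + 1) (net.length + 1) (by omega) celeb hp
      rw [this] at hcc
      cases hcc
    rw [hans]
  · have hct : (baconRounds net net.length
        (PySem.Dict.empty.insert "Kevin Bacon" 0)).contains celeb = true := by
      rw [hdom celeb]
      exact hcc
    obtain ⟨k, hk⟩ : ∃ k, (baconRounds net net.length
        (PySem.Dict.empty.insert "Kevin Bacon" 0)).get? celeb = some k :=
      Option.isSome_iff_exists.mp (by rw [← PySem.Dict.contains_eq_isSome_get?]; exact hct)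
    obtain ⟨m, rfl, hm1, hm0⟩ := hval celeb k hk
    rw [PySem.Dict.getD_of_get?_eq_some _ _ hk]
    have hmN : m < net.length + 1 := by
      by_contra hmN
      have := bnLvl_mono net (net.length + 1) m (by omega) celeb hcc
      rw [this] at hm0
      cases hm0
    have hlt : ∀ d, d < m → ((bnLvl net (d + 1)).1).contains celeb = false := by
      intro d hd
      cases hpd : ((bnLvl net (d + 1)).1).contains celeb
      · rfl
      · exfalso
        have := bnLvl_mono net (d + 1) m (by omega) celeb hpd
        rw [this] at hm0
        cases hm0
    have hans : bnAns net celeb = (m : Int) := by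
      unfold bnAns
      rw [bnFind_range_some (fun d => ((bnLvl net (d + 1)).1).contains celeb)
        (net.length + 1) m hmN hm1 hlt]
    rw [hans]

-- ===== VERDICT (by name: the statement is the Claim_ definition above) =====
theorem bacon_number_spec : Claim_equal_bacon_number := by
  intro net celeb _ hpre
  unfold Spec_bacon_number bacon_number bacon_number_alt
  by_cases hct : (net.map Prod.fst).contains celeb = true
  · by_cases hkbc : celeb = "Kevin Bacon"
    · rw [if_neg (not_not_intro hct), if_neg (not_not_intro hct), if_pos hkbc, if_pos hkbc]
    · rcases hpre with h | h | ⟨hkb, hcl, hnd⟩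
      · exact absurd hct h
      · exact absurd h hkbc
      · rw [if_neg (not_not_intro hct), if_neg hkbc, if_neg (not_not_intro hct), if_neg hkbc]
        have hq := queue_eq_level net celeb
          (1 + net.length + (net.map (fun kv => kv.2.length)).sum)
          PySem.Set.empty ["Kevin Bacon"] [] 0
        simp only [List.map_cons, List.map_nil, List.append_nil] at hq
        rw [hq]
        have hS : bnSumN net PySem.Set.empty = (net.map (fun kv => kv.2.length)).sum := by
          simp [bnSumN, PySem.Set.empty, PySem.Set.contains]
        have hW : bnW net PySem.Set.empty ["Kevin Bacon"] []
            ≤ 1 + net.length + (net.map (fun kv => kv.2.length)).sum := by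
          simp only [bnW, List.length_singleton, List.length_nil, hS]
          omega
        rw [bnLoop_eq_bnRun net celeb _ _ _ _ _ hW]
        simp only [Option.getD_some]
        rw [bnRun_eq_ans net celeb hkb hcl, bnRounds_eq_ans net celeb hnd]
  · rw [if_pos hct, if_pos hct]
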